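-- pv_equiv track=rewrite | github.com/damien-neveu/algo-study | search/top_k_frequent.py | build_map_frequencies
-- ===== SOURCE A (Python) =====
-- from typing import Dict, List
--
-- def build_map_frequencies(nums: List[int]) -> Dict[int, int]:
--     map_frequencies = {}
--     for num in nums:
--         if num in map_frequencies:
--             map_frequencies[num] = map_frequencies[num] + 1
--         else:
--             map_frequencies[num] = 1
--     return map_frequencies
-- ===== SOURCE B (Python) =====
-- def build_map_frequencies(nums):
--     # selection-style grouping: repeatedly take the first remaining value,
--     # count its occurrences in the remaining list, then filter them all out.
--     result = {}
--     remaining = list(nums)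
--     while remaining:
--         head = remaining[0]
--         result[head] = remaining.count(head)
--         remaining = [x for x in remaining if x != head]
--     return result
-- ===== Notes on version B (the rewrite author's own statement) =====
-- stated objective: alternative
-- what changed: Replaces the single-pass membership-test-and-increment dict loop with a selection-style grouping loop: repeatedly take the first value of the remaining list, record its count there, and filter out all its occurrences until the list is empty.
import Mathlib
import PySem

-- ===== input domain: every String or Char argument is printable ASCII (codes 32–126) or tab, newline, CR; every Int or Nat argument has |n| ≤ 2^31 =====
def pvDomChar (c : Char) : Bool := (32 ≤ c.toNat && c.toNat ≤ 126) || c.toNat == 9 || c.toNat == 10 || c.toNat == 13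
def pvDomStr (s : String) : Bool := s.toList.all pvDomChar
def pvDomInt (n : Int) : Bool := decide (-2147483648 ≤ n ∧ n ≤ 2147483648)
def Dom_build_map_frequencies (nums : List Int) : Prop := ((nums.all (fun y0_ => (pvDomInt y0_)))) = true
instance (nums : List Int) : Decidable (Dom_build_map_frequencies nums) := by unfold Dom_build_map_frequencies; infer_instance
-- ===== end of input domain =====

-- B replaces A's single-pass membership-test-and-increment loop by a selection-style
-- grouping loop (take the first remaining value, count it, filter it out); an
-- alternative decomposition, not claimed faster.

-- ===== PORT A =====
-- loop: if num in map: map[num] = map[num] + 1 else map[num] = 1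
-- (map[num] on the true branch is a guaranteed-present lookup, ported as getD _ 0)
def build_map_frequencies (nums : List Int) : List (Int × Int) :=
  (nums.foldl
    (fun d num =>
      if d.contains num then d.insert num (d.getD num 0 + 1)
      else d.insert num 1)
    PySem.Dict.empty).items

-- ===== PORT B =====
-- while remaining: head = remaining[0]; result[head] = remaining.count(head);
--                  remaining = [x for x in remaining if x != head]
def pvFreqLoop (result : PySem.Dict Int Int) : List Int → PySem.Dict Int Int
  | [] => result
  | head :: tail =>
      pvFreqLoop
        (result.insert head (((head :: tail).count head : Int)))
        ((head :: tail).filter (fun x => x ≠ head))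
  termination_by remaining => remaining.length
  decreasing_by
    simp only [List.filter_cons, ne_eq, List.length_cons]
    simp
    have h1 := List.length_filter_le (fun x => !decide (x = head)) tail
    omega

def build_map_frequencies_alt (nums : List Int) : List (Int × Int) :=
  (pvFreqLoop PySem.Dict.empty nums).items

-- ===== PRECONDITION & SPEC =====
def Spec_build_map_frequencies (nums : List Int) (out : List (Int × Int)) : Prop := out = build_map_frequencies_alt nums
instance (nums : List Int) (out : List (Int × Int)) : Decidable (Spec_build_map_frequencies nums out) := by unfold Spec_build_map_frequencies; infer_instance

-- ===== CLAIM =====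
def Claim_equal_build_map_frequencies : Prop := ∀ (nums : List Int), Dom_build_map_frequencies nums → Spec_build_map_frequencies nums (build_map_frequencies nums)

-- ===== LEMMAS AND PROOFS =====

-- A's step function is Counter's step: on a fresh key getD _ 0 + 1 = 1.
theorem pvStepA_eq_counter_step :
    (fun (d : PySem.Dict Int Int) (num : Int) =>
      if d.contains num then d.insert num (d.getD num 0 + 1) else d.insert num 1)
    = (fun (d : PySem.Dict Int Int) (num : Int) => d.insert num (d.getD num 0 + 1)) := by
  funext d num
  by_cases h : d.contains num = true
  · simp [h]
  · simp only [Bool.not_eq_true] at h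
    simp [h, PySem.Dict.getD_of_not_contains]

theorem pvA_items (nums : List Int) :
    build_map_frequencies nums
      = (PySem.Set.ofList nums).map (fun k => (k, (nums.count k : Int))) := by
  unfold build_map_frequencies
  rw [pvStepA_eq_counter_step, PySem.Dict.foldl_insert_getD_add_one_eq_counter,
    PySem.Dict.items_counter]

-- Set.discard is a filter
theorem pvDiscard_eq_filter (s : List Int) (a : Int) :
    PySem.Set.discard s a = s.filter (fun x => x ≠ a) := by
  simp only [PySem.Set.discard]
  apply List.filter_congr
  intro x _
  rw [beq_eq_decide]
  simp

-- discard twice removes nothing new, and discards commute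
theorem pvDiscard_discard_self (s : List Int) (a : Int) :
    PySem.Set.discard (PySem.Set.discard s a) a = PySem.Set.discard s a := by
  simp only [pvDiscard_eq_filter, List.filter_filter]
  apply List.filter_congr
  intro x _
  rw [Bool.and_self]

theorem pvDiscard_comm (s : List Int) (a b : Int) :
    PySem.Set.discard (PySem.Set.discard s a) b
      = PySem.Set.discard (PySem.Set.discard s b) a := by
  simp only [pvDiscard_eq_filter, List.filter_filter]
  apply List.filter_congr
  intro x _
  rw [Bool.and_comm]

-- removing a value from set(t) = set(t with that value filtered out)
theorem pvDiscard_ofList (t : List Int) (a : Int) :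
    PySem.Set.discard (PySem.Set.ofList t) a
      = PySem.Set.ofList (t.filter (fun x => x ≠ a)) := by
  induction t with
  | nil => rfl
  | cons y ys ih =>
    by_cases hy : y = a
    · subst hy
      calc PySem.Set.discard (PySem.Set.ofList (y :: ys)) y
          = PySem.Set.discard (y :: PySem.Set.discard (PySem.Set.ofList ys) y) y := by
            rw [PySem.Set.ofList_cons]
        _ = PySem.Set.discard (PySem.Set.discard (PySem.Set.ofList ys) y) y := by
            conv_lhs => rw [pvDiscard_eq_filter, List.filter_cons]
            rw [if_neg (by simp), ← pvDiscard_eq_filter]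
        _ = PySem.Set.discard (PySem.Set.ofList ys) y := pvDiscard_discard_self _ _
        _ = PySem.Set.ofList (ys.filter (fun x => x ≠ y)) := ih
        _ = PySem.Set.ofList ((y :: ys).filter (fun x => x ≠ y)) := by
            rw [List.filter_cons]
            simp
    · calc PySem.Set.discard (PySem.Set.ofList (y :: ys)) a
          = PySem.Set.discard (y :: PySem.Set.discard (PySem.Set.ofList ys) y) a := by
            rw [PySem.Set.ofList_cons]
        _ = y :: PySem.Set.discard (PySem.Set.discard (PySem.Set.ofList ys) y) a := by
            conv_lhs => rw [pvDiscard_eq_filter, List.filter_cons]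
            rw [if_pos (by simp [hy]), ← pvDiscard_eq_filter]
        _ = y :: PySem.Set.discard (PySem.Set.discard (PySem.Set.ofList ys) a) y := by
            rw [pvDiscard_comm]
        _ = y :: PySem.Set.discard (PySem.Set.ofList (ys.filter (fun x => x ≠ a))) y := by
            rw [ih]
        _ = PySem.Set.ofList (y :: ys.filter (fun x => x ≠ a)) := by
            rw [PySem.Set.ofList_cons]
        _ = PySem.Set.ofList ((y :: ys).filter (fun x => x ≠ a)) := by
            rw [List.filter_cons]
            simp [hy]

-- one-step unfoldings of the while loop
theorem pvFreqLoop_nil (result : PySem.Dict Int Int) : pvFreqLoop result [] = result := by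
  rw [pvFreqLoop.eq_def]

theorem pvFreqLoop_cons (result : PySem.Dict Int Int) (h : Int) (t : List Int) :
    pvFreqLoop result (h :: t)
      = pvFreqLoop (result.insert h (((h :: t).count h : Int)))
          ((h :: t).filter (fun x => x ≠ h)) := by
  rw [pvFreqLoop.eq_def]

-- set(l) written head-first
theorem pvOfList_cons_filter (h : Int) (t : List Int) :
    PySem.Set.ofList (h :: t)
      = h :: PySem.Set.ofList (t.filter (fun x => x ≠ h)) := by
  rw [PySem.Set.ofList_cons, pvDiscard_ofList]

-- the loop invariant: keys already placed never recur in `remaining`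
theorem pvFreqLoop_items (n : Nat) :
    ∀ (remaining : List Int), remaining.length ≤ n →
    ∀ (result : PySem.Dict Int Int),
      result.keys.Nodup →
      (∀ k ∈ remaining, result.contains k = false) →
      (pvFreqLoop result remaining).items
        = result.items
          ++ (PySem.Set.ofList remaining).map (fun k => (k, (remaining.count k : Int))) := by
  induction n with
  | zero =>
    intro remaining hlen result _ _
    have h0 : remaining = [] := List.eq_nil_of_length_eq_zero (Nat.le_zero.mp hlen)
    subst h0
    rw [pvFreqLoop_nil]
    simp
  | succ n ih =>
    intro remaining hlen result hnd hfresh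
    match remaining with
    | [] =>
      rw [pvFreqLoop_nil]
      simp
    | head :: tail =>
      rw [pvFreqLoop_cons]
      have htail : (head :: tail).filter (fun x => x ≠ head)
          = tail.filter (fun x => x ≠ head) := by
        simp
      have hlen' : ((head :: tail).filter (fun x => x ≠ head)).length ≤ n := by
        rw [htail]
        have := List.length_filter_le (fun x => decide (x ≠ head)) tail
        simp only [List.length_cons] at hlen
        omega
      have hfresh' : ∀ k ∈ (head :: tail).filter (fun x => x ≠ head),
          (result.insert head (((head :: tail).count head : Int))).contains k = false := by
        intro k hk
        rw [htail] at hk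
        have hkt : k ∈ tail := List.mem_of_mem_filter hk
        have hkne : k ≠ head := by
          have := List.of_mem_filter hk
          simpa using this
        rw [PySem.Dict.contains_insert]
        have h1 : (k == head) = false := by simp [hkne]
        have h2 : result.contains k = false := hfresh k (List.mem_cons_of_mem _ hkt)
        simp [h1, h2]
      have hnd' : (result.insert head (((head :: tail).count head : Int))).keys.Nodup :=
        PySem.Dict.nodup_keys_insert _ _ _ hnd
      rw [ih _ hlen' _ hnd' hfresh']
      have hitems : (result.insert head (((head :: tail).count head : Int))).items
          = result.items ++ [(head, ((head :: tail).count head : Int))] := by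
        apply PySem.Dict.items_insert_of_not_contains
        exact hfresh head (by simp)
      rw [hitems, htail, pvOfList_cons_filter, List.map_cons, List.append_assoc]
      congr 1
      simp only [List.singleton_append]
      congr 1
      apply List.map_congr_left
      intro k hk
      have hkmem : k ∈ tail.filter (fun x => x ≠ head) := by
        have := PySem.Set.mem_ofList (xs := tail.filter (fun x => x ≠ head)) (y := k)
        exact this.mp hk
      have hkne : k ≠ head := by
        have := List.of_mem_filter hkmem
        simpa using this
      have h1 : (tail.filter (fun x => decide (x ≠ head))).count k = tail.count k := by
        apply List.count_filter
        simp [hkne]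
      have h2 : (head :: tail).count k = tail.count k := by
        simp [Ne.symm hkne]
      rw [h1, h2]

-- ===== VERDICT =====
theorem build_map_frequencies_spec : Claim_equal_build_map_frequencies := by
  intro nums _
  unfold Spec_build_map_frequencies build_map_frequencies_alt
  rw [pvA_items, pvFreqLoop_items nums.length nums (Nat.le_refl _) PySem.Dict.empty
    PySem.Dict.nodup_keys_empty (fun k _ => PySem.Dict.contains_empty k)]
  rfl
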